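-- pv_equiv track=rewrite | github.com/daalgi/algorithms | dynamic_programming/memoization/all_construct.py | all_construct_slow
-- ===== SOURCE A (Python) =====
-- def all_construct_slow(target: str, words: list):
--     if target == '': return [[]]
--
--     result = []
--     for word in words:
--         n = len(word)
--         if target[:n] == word:
--             suffix = target[n:]
--             suffix_ways = all_construct_slow(suffix, words)
--             result += [[word] + s for s in suffix_ways]
--
--     return result
-- ===== SOURCE B (Python) =====
-- def all_construct_slow(target: str, words: list):
--     # Memoized top-down search: each distinct suffix is solved at most once.
--     memo = {}
--
--     def go(t):
--         if t in memo:
--             return memo[t]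
--         if t == '':
--             return [[]]
--         res = []
--         for word in words:
--             k = len(word)
--             if t[:k] == word:
--                 res += [[word] + s for s in go(t[k:])]
--         memo[t] = res
--         return res
--
--     return go(target)
-- ===== Notes on version B (the rewrite author's own statement) =====
-- stated objective: alternative
-- what changed: Adds a memo table keyed by the remaining suffix so every distinct suffix is solved at most once (top-down dynamic programming) instead of A's naive recursion that re-enters the same suffix repeatedly; since the returned list of constructions can itself be exponentially large, the measured end-to-end cost is output-dominated and similar (timing: ~1.2x at the largest size both finished).
import Mathlib
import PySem

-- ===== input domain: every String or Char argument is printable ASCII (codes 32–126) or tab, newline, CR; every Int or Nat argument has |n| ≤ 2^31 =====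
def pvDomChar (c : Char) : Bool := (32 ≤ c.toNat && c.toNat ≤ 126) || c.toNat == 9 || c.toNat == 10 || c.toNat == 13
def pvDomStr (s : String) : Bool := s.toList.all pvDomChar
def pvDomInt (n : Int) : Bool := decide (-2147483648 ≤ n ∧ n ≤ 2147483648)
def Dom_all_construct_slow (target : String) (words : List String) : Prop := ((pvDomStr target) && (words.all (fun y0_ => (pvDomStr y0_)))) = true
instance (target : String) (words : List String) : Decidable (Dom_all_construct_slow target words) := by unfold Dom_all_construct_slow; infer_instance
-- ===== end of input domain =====

-- B memoizes the recursion per distinct target suffix (top-down dynamic programming)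
-- instead of A's naive re-recursion; equivalence of the return values is proved on Pre_.

-- ===== PORT A =====
-- Fuel-based transliteration of A's recursion; inside Pre_ the fuel
-- target.length + 1 is always sufficient (matched words are nonempty).
def aAux : Nat → List Char → List String → List (List String)
  | 0, _, _ => []
  | fuel+1, t, words =>
    if t = [] then [[]]
    else
      words.foldl (fun result word =>
        let n := word.toList.length
        if t.take n = word.toList then
          result ++ (aAux fuel (t.drop n) words).map (fun s => word :: s)
        else result) []

def all_construct_slow (target : String) (words : List String) : List (List String) :=
  aAux (target.toList.length + 1) target.toList words

-- ===== PORT B =====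
-- B's inner 'go' threads the memo dict through the recursion; fuel plays the role of
-- Python's recursion limit (inside Pre_ it is never exhausted).
def goB (words : List String) : Nat → List Char → PySem.Dict (List Char) (List (List String)) → (List (List String)) × PySem.Dict (List Char) (List (List String))
  | 0, _, memo => ([], memo)
  | fuel+1, t, memo =>
    match PySem.Dict.get? memo t with
    | some v => (v, memo)
    | none =>
      if t = [] then ([[]], memo)
      else
        let p := words.foldl (fun acc word =>
            let k := word.toList.length
            if t.take k = word.toList then
              let r := goB words fuel (t.drop k) acc.2
              (acc.1 ++ r.1.map (fun s => word :: s), r.2)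
            else acc) ([], memo)
        (p.1, PySem.Dict.insert p.2 t p.1)

def all_construct_slow_alt (target : String) (words : List String) : List (List String) :=
  (goB words (target.toList.length + 1) target.toList PySem.Dict.empty).1

-- ===== PRECONDITION & SPEC =====
-- Pre_ excludes exactly the inputs on which A raises (RecursionError: with "" among
-- the words and a nonempty target, the recursion re-enters itself on the same target;
-- B's memoized recursion hits the recursion limit on the same inputs).
def Pre_all_construct_slow (target : String) (words : List String) : Prop :=
  target = "" ∨ "" ∉ words
instance (target : String) (words : List String) : Decidable (Pre_all_construct_slow target words) := by unfold Pre_all_construct_slow; infer_instance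

def pvWitness_all_construct_slow : String × List String := ("ab", ["a", "b", "ab"])

def Spec_all_construct_slow (target : String) (words : List String) (out : List (List String)) : Prop := out = all_construct_slow_alt target words
instance (target : String) (words : List String) (out : List (List String)) : Decidable (Spec_all_construct_slow target words out) := by unfold Spec_all_construct_slow; infer_instance

-- ===== CLAIM (what is proved, stated in full; the proofs are below) =====
def Claim_equal_all_construct_slow : Prop := ∀ (target : String) (words : List String), Dom_all_construct_slow target words → Pre_all_construct_slow target words → Spec_all_construct_slow target words (all_construct_slow target words)

-- ===== LEMMAS AND PROOFS =====

theorem toList_ne_nil_of_mem {words : List String} (hw : "" ∉ words)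
    {w : String} (h : w ∈ words) : w.toList ≠ [] := by
  intro hnil
  apply hw
  have hws : w = "" := by
    have := congrArg String.ofList hnil
    simpa using this
  exact hws ▸ h

theorem aAux_fuel_irrel (words : List String) (hw : "" ∉ words) :
    ∀ (N : Nat) (t : List Char), t.length < N →
      ∀ f1 f2, t.length < f1 → t.length < f2 →
        aAux f1 t words = aAux f2 t words := by
  intro N
  induction N with
  | zero => intro t h; omega
  | succ N ih =>
    intro t htN f1 f2 h1 h2
    match f1, h1 with
    | g1+1, _ =>
    match f2, h2 with
    | g2+1, _ =>
    by_cases ht : t = []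
    · simp [aAux, ht]
    · simp only [aAux, if_neg ht]
      refine PySem.List.foldl_congr_mem _ _ _ _ (fun acc w hwmem => ?_)
      have hwne : w.toList ≠ [] := toList_ne_nil_of_mem hw hwmem
      have hk : 1 ≤ w.toList.length := by
        cases hl : w.toList with
        | nil => exact absurd hl hwne
        | cons a l => simp
      split_ifs with hc
      · have htlen : 1 ≤ t.length := by
          cases t with
          | nil => exact absurd rfl ht
          | cons a l => simp
        have hd : (t.drop w.toList.length).length = t.length - w.toList.length := by
          simp
        have := ih (t.drop w.toList.length) (by omega) g1 g2 (by omega) (by omega)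
        rw [this]
      · rfl

-- The memo invariant: every cached value is the answer A computes for its key.
def MemoOK (words : List String)
    (memo : PySem.Dict (List Char) (List (List String))) : Prop :=
  ∀ k v, PySem.Dict.get? memo k = some v → v = aAux (k.length + 1) k words

theorem fold_ok (words : List String) (hw : "" ∉ words) (t : List Char) (g : Nat)
    (ht : t ≠ []) (hg : t.length ≤ g)
    (hrec : ∀ (t' : List Char) memo, t'.length < t.length → t'.length < g →
        MemoOK words memo →
        (goB words g t' memo).1 = aAux (t'.length + 1) t' words ∧
        MemoOK words (goB words g t' memo).2) :
    ∀ (l : List String), (∀ w ∈ l, w ∈ words) →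
      ∀ (res : List (List String)) memo, MemoOK words memo →
        (l.foldl (fun acc word =>
            let k := word.toList.length
            if t.take k = word.toList then
              let r := goB words g (t.drop k) acc.2
              (acc.1 ++ r.1.map (fun s => word :: s), r.2)
            else acc) (res, memo)).1 =
          l.foldl (fun result word =>
            let n := word.toList.length
            if t.take n = word.toList then
              result ++ (aAux g (t.drop n) words).map (fun s => word :: s)
            else result) res ∧
        MemoOK words (l.foldl (fun acc word =>
            let k := word.toList.length
            if t.take k = word.toList then
              let r := goB words g (t.drop k) acc.2
              (acc.1 ++ r.1.map (fun s => word :: s), r.2)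
            else acc) (res, memo)).2 := by
  intro l
  induction l with
  | nil => intro _ res memo hm; exact ⟨rfl, hm⟩
  | cons w l ih =>
    intro hsub res memo hm
    have hwmem : w ∈ words := hsub w (List.mem_cons_self ..)
    have hwne : w.toList ≠ [] := toList_ne_nil_of_mem hw hwmem
    have hk1 : 1 ≤ w.toList.length := by
      cases hl : w.toList with
      | nil => exact absurd hl hwne
      | cons a l' => simp
    have htlen : 1 ≤ t.length := by
      cases t with
      | nil => exact absurd rfl ht
      | cons a l' => simp
    simp only [List.foldl_cons]
    by_cases hc : t.take w.toList.length = w.toList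
    · have hd : (t.drop w.toList.length).length = t.length - w.toList.length := by
        simp
      have hrw := hrec (t.drop w.toList.length) memo (by omega) (by omega) hm
      have hirr : aAux ((t.drop w.toList.length).length + 1) (t.drop w.toList.length) words
          = aAux g (t.drop w.toList.length) words :=
        aAux_fuel_irrel words hw (t.length + 1) _ (by omega) _ _ (by omega) (by omega)
      have h1 := ih (fun x hx => hsub x (List.mem_cons_of_mem _ hx))
        (res ++ ((goB words g (t.drop w.toList.length) memo).1).map (fun s => w :: s))
        (goB words g (t.drop w.toList.length) memo).2 hrw.2
      simp only [hc, if_pos, hrw.1, hirr] at h1 ⊢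
      exact h1
    · simp only [hc, if_false]
      exact ih (fun x hx => hsub x (List.mem_cons_of_mem _ hx)) res memo hm

theorem goB_ok (words : List String) (hw : "" ∉ words) :
    ∀ (N : Nat) (t : List Char), t.length < N →
      ∀ (g : Nat) memo, t.length ≤ g → MemoOK words memo →
        (goB words (g + 1) t memo).1 = aAux (t.length + 1) t words ∧
        MemoOK words (goB words (g + 1) t memo).2 := by
  intro N
  induction N with
  | zero => intro t h; omega
  | succ N ih =>
    intro t htN g memo hg hm
    simp only [goB]
    cases hmem : PySem.Dict.get? memo t with
    | some v =>
      exact ⟨hm t v hmem, hm⟩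
    | none =>
      by_cases ht : t = []
      · subst ht; simp [aAux, hm]
      · simp only [if_neg ht]
        have htlen : 1 ≤ t.length := by
          cases t with
          | nil => exact absurd rfl ht
          | cons a l' => simp
        have hrec : ∀ (t' : List Char) memo', t'.length < t.length → t'.length < g →
            MemoOK words memo' →
            (goB words g t' memo').1 = aAux (t'.length + 1) t' words ∧
            MemoOK words (goB words g t' memo').2 := by
          intro t' memo' hlt hltg hm'
          match g, hltg with
          | g'+1, _ =>
            exact ih t' (by omega) g' memo' (by omega) hm'
        have hf := fold_ok words hw t g ht hg hrec words (fun _ h => h) [] memo hm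
        have hA : aAux (t.length + 1) t words =
            words.foldl (fun result word =>
              if t.take word.toList.length = word.toList then
                result ++ (aAux t.length (t.drop word.toList.length) words).map (fun s => word :: s)
              else result) [] := by
          simp only [aAux, if_neg ht]
        have hfold : (words.foldl (fun result word =>
              if t.take word.toList.length = word.toList then
                result ++ (aAux g (t.drop word.toList.length) words).map (fun s => word :: s)
              else result) []) = aAux (t.length + 1) t words := by
          rw [hA]
          refine PySem.List.foldl_congr_mem _ _ _ _ (fun acc w hwmem => ?_)
          have hwne : w.toList ≠ [] := toList_ne_nil_of_mem hw hwmem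
          have hk1 : 1 ≤ w.toList.length := by
            cases hl : w.toList with
            | nil => exact absurd hl hwne
            | cons a l' => simp
          split_ifs with hc
          · have hd : (t.drop w.toList.length).length = t.length - w.toList.length := by
              simp
            have := aAux_fuel_irrel words hw (t.length + 1) (t.drop w.toList.length)
              (by omega) g t.length (by omega) (by omega)
            rw [this]
          · rfl
        have h1 := hf.1.trans hfold
        refine ⟨h1, ?_⟩
        intro k v hkv
        rw [PySem.Dict.get?_insert] at hkv
        by_cases hkt : k = t
        · rw [if_pos hkt] at hkv
          cases hkv
          rw [hkt]
          exact h1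
        · rw [if_neg hkt] at hkv
          exact hf.2 k v hkv

-- ===== VERDICT (by name: the statement is the Claim_ definition above) =====
theorem all_construct_slow_spec : Claim_equal_all_construct_slow := by
  intro target words _hDom hPre
  unfold Spec_all_construct_slow
  rcases hPre with hempty | hw
  · subst hempty; rfl
  · unfold all_construct_slow all_construct_slow_alt
    have hm0 : MemoOK words PySem.Dict.empty := by
      intro k v h
      simp [PySem.Dict.get?_empty] at h
    exact (goB_ok words hw (target.toList.length + 1) target.toList (by omega)
      target.toList.length PySem.Dict.empty (le_refl _) hm0).1.symm
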